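-- pv_equiv track=rewrite | github.com/skyfire100/Codewars | completed/the-office-vi-sabbatical/the-office-vi-sabbatical.py | sabb
-- ===== SOURCE A (Python) =====
-- def sabb(s, val, happiness):
--     answer = val + happiness
--     sabticl = ["s", "a", "b", "t", "i", "c", "l"]
--     for letter in s:
--         if letter.lower() in sabticl:
--             answer += 1
--     if answer > 22:
--         return "Sabbatical! Boom!"
--     return "Back to your desk, boy."
-- ===== SOURCE B (Python) =====
-- def sabb(s, val, happiness):
--     total = val + happiness + sum(s.lower().count(c) for c in "sabticl")
--     if total > 22:
--         return "Sabbatical! Boom!"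
--     return "Back to your desk, boy."
-- ===== Notes on version B (the rewrite author's own statement) =====
-- stated objective: faster
-- what changed: B replaces A's single Python-level pass with a per-character membership test by seven whole-string str.count scans of s.lower(), summed in one arithmetic expression.
import Mathlib
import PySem

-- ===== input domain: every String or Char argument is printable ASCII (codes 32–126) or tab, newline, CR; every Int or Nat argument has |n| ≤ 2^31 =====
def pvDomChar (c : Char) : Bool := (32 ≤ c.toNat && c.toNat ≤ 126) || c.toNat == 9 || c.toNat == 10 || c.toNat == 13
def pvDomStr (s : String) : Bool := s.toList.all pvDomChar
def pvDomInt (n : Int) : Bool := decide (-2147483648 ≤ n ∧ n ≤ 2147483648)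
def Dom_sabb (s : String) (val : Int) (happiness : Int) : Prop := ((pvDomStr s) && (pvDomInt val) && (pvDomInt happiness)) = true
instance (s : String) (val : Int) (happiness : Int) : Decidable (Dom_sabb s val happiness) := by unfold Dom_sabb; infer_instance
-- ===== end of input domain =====

-- B replaces A's single membership-test pass by seven per-letter count() scans of s.lower(), summed; alternative decomposition, same cost class.


-- ===== PORT A =====
-- the list ["s","a","b","t","i","c","l"] of one-character strings, ported at char level
def sabbLetters : List Char := ['s', 'a', 'b', 't', 'i', 'c', 'l']

def sabb (s : String) (val : Int) (happiness : Int) : String :=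
  let answer := val + happiness
  let answer := s.toList.foldl
    (fun acc letter => if PySem.Chars.lowerChar letter ∈ sabbLetters then acc + 1 else acc) answer
  if answer > 22 then "Sabbatical! Boom!" else "Back to your desk, boy."

-- ===== PORT B =====
def sabb_alt (s : String) (val : Int) (happiness : Int) : String :=
  let total := val + happiness +
    ((("sabticl").toList.map
      (fun c => (PySem.Chars.count (PySem.Chars.lower s.toList) [c] : Int))).sum)
  if total > 22 then "Sabbatical! Boom!" else "Back to your desk, boy."

-- ===== PRECONDITION & SPEC =====
def Spec_sabb (s : String) (val : Int) (happiness : Int) (out : String) : Prop := out = sabb_alt s val happiness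
instance (s : String) (val : Int) (happiness : Int) (out : String) : Decidable (Spec_sabb s val happiness out) := by unfold Spec_sabb; infer_instance

-- ===== CLAIM (what is proved, stated in full; the proofs are below) =====
def Claim_equal_sabb : Prop := ∀ (s : String) (val : Int) (happiness : Int), Dom_sabb s val happiness → Spec_sabb s val happiness (sabb s val happiness)

-- ===== LEMMAS AND PROOFS =====

-- str.count with a single-character needle is the char count
theorem count_go_singleton (c : Char) (l : List Char) :
    ∀ (fuel acc : Nat), l.length ≤ fuel →
      PySem.Chars.count.go [c] fuel l acc = acc + l.count c := by
  induction l with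
  | nil =>
      intro fuel acc _
      cases fuel <;> simp [PySem.Chars.count.go]
  | cons h t ih =>
      intro fuel acc hle
      cases fuel with
      | zero => simp at hle
      | succ n =>
          simp only [List.length_cons, Nat.succ_le_succ_iff] at hle
          by_cases hc : c = h
          · subst hc
            simp [PySem.Chars.count.go, List.isPrefixOf, ih n (acc + 1) hle,
              List.count_cons_self]
            omega
          · simp [PySem.Chars.count.go, List.isPrefixOf, hc, ih n acc hle, Ne.symm hc]

theorem count_singleton (m : List Char) (c : Char) :
    PySem.Chars.count m [c] = m.count c := by
  simp [PySem.Chars.count, count_go_singleton c m m.length 0 le_rfl]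

-- one occurrence contributes 1 to exactly one of the seven counts
theorem indicator_sum (a : Char) :
    ((sabbLetters.map (fun c => if a = c then (1 : Int) else 0)).sum)
      = (if a ∈ sabbLetters then (1 : Int) else 0) := by
  simp only [sabbLetters, List.map, List.sum_cons, List.sum_nil, List.mem_cons,
    List.not_mem_nil, or_false]
  split_ifs <;> simp_all

-- the seven counts of m sum to the number of elements of m in sabbLetters
theorem sum_counts (m : List Char) :
    ((sabbLetters.map (fun c => (m.count c : Int))).sum)
      = (m.countP (fun x => decide (x ∈ sabbLetters)) : Int) := by
  induction m with
  | nil => simp [sabbLetters]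
  | cons a m ih =>
      have : (sabbLetters.map (fun c => ((a :: m).count c : Int)))
          = sabbLetters.map (fun c => (m.count c : Int) + if a = c then 1 else 0) := by
        apply List.map_congr_left
        intro c _
        by_cases h : a = c
        · subst h; simp
        · simp [h]
      rw [this, PySem.List.sum_map_add_int, ih, indicator_sum a, List.countP_cons]
      by_cases hmem : a ∈ sabbLetters <;> simp [hmem]

theorem sabb_eq_alt (s : String) (val happiness : Int) :
    sabb s val happiness = sabb_alt s val happiness := by
  unfold sabb sabb_alt
  have hmap : ("sabticl").toList = sabbLetters := by decide
  have hcnt : (sabbLetters.map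
      (fun c => (PySem.Chars.count (PySem.Chars.lower s.toList) [c] : Int)))
      = sabbLetters.map (fun c => ((PySem.Chars.lower s.toList).count c : Int)) := by
    apply List.map_congr_left; intro c _; rw [count_singleton]
  simp only [hmap, hcnt]
  simp only [sum_counts, PySem.Chars.lower, List.countP_map,
    PySem.List.foldl_ite_add_one (fun letter => PySem.Chars.lowerChar letter ∈ sabbLetters)]
  rfl

-- ===== VERDICT (by name: the statement is the Claim_ definition above) =====
theorem sabb_spec : Claim_equal_sabb := by
  intro s val happiness _
  unfold Spec_sabb
  exact sabb_eq_alt s val happiness
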